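-- pv_equiv track=rewrite | github.com/BhuvaneshBhatt/SpecialFunctions | MultiplePolylogarithms/src/hpl.py | right_zeros_length
-- ===== SOURCE A (Python) =====
-- def right_zeros_length(mm: tuple[int, ...]) -> int:
--     """Return the number of trailing zeros in the parameter list."""
--     count = 0
--     for m in reversed(mm):
--         if m == 0:
--             count += 1
--         else:
--             break
--     return count
-- ===== SOURCE B (Python) =====
-- def right_zeros_length(mm: tuple[int, ...]) -> int:
--     """Return the number of trailing zeros in the parameter list."""
--     last = -1
--     for i, m in enumerate(mm):
--         if m != 0:
--             last = i
--     return len(mm) - 1 - last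
-- ===== Notes on version B (the rewrite author's own statement) =====
-- stated objective: alternative
-- what changed: Replaced the reversed scan with early break and an explicit counter by a single forward enumerate pass that tracks the index of the last non-zero element and returns len(mm)-1-last.
import Mathlib
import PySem

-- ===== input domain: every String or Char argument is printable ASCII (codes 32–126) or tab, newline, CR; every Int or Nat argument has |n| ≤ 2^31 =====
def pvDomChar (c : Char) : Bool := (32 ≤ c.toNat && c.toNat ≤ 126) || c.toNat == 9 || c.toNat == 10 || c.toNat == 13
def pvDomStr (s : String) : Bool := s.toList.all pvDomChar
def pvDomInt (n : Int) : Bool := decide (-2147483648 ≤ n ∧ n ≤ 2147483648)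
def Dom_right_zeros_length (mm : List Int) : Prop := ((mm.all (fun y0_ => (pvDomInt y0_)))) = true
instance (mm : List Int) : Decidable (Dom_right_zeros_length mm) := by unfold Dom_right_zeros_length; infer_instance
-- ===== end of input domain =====

-- B changes the decomposition: a forward enumerate pass tracking the last non-zero index, instead of A's reversed scan with early break.

-- ===== PORT A =====
-- A: count = 0; for m in reversed(mm): if m == 0: count += 1 else: break; return count
def rzlLoopA : List Int → Int
  | [] => 0
  | m :: rest => if m = 0 then rzlLoopA rest + 1 else 0

def right_zeros_length (mm : List Int) : Int := rzlLoopA mm.reverse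

-- ===== PORT B =====
-- B: last = -1; for i, m in enumerate(mm): if m != 0: last = i; return len(mm) - 1 - last
def right_zeros_length_alt (mm : List Int) : Int :=
  let last := (PySem.List.enumerate mm).foldl (fun acc p => if p.2 ≠ 0 then p.1 else acc) (-1)
  (mm.length : Int) - 1 - last

-- ===== PRECONDITION & SPEC =====
def Spec_right_zeros_length (mm : List Int) (out : Int) : Prop := out = right_zeros_length_alt mm
instance (mm : List Int) (out : Int) : Decidable (Spec_right_zeros_length mm out) := by unfold Spec_right_zeros_length; infer_instance

-- ===== CLAIM (what is proved, stated in full; the proofs are below) =====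
def Claim_equal_right_zeros_length : Prop := ∀ (mm : List Int), Dom_right_zeros_length mm → Spec_right_zeros_length mm (right_zeros_length mm)

-- ===== LEMMAS AND PROOFS =====

theorem rzl_main : ∀ (mm : List Int),
    rzlLoopA mm.reverse =
      (mm.length : Int) - 1 -
        (PySem.List.enumerate mm).foldl (fun acc p => if p.2 ≠ 0 then p.1 else acc) (-1) := by
  intro mm
  induction mm using List.reverseRecOn with
  | nil => simp [rzlLoopA, PySem.List.enumerate]
  | append_singleton l x ih =>
      rw [List.reverse_append]
      simp only [List.reverse_singleton, List.singleton_append]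
      rw [PySem.List.enumerate_append, List.foldl_append]
      by_cases hx : x = 0
      · simp [rzlLoopA, hx, PySem.List.enumerate, ih]
        push_cast
        ring
      · simp [rzlLoopA, hx, PySem.List.enumerate]

-- ===== VERDICT (by name: the statement is the Claim_ definition above) =====
theorem right_zeros_length_spec : Claim_equal_right_zeros_length := by
  intro mm _
  unfold Spec_right_zeros_length right_zeros_length right_zeros_length_alt
  exact rzl_main mm
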